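-- pv_equiv track=rewrite | github.com/GauravB159/Advent-of-Code-2023 | Day 21/twostar.py | get_obstacle_pixel_count
-- ===== SOURCE A (Python) =====
-- def get_obstacle_pixel_count(text):
--     odd_count = 0
--     even_count = 0
--     for i, row in enumerate(text):
--         for j, col in enumerate(row):
--             if col == '#':
--                 if (i + j) % 2 == 0:
--                     odd_count += 1
--                 else:
--                     even_count += 1
--     return odd_count, even_count
-- ===== SOURCE B (Python) =====
-- def get_obstacle_pixel_count(text):
--     # Back-to-front fold: no enumerate and no per-cell parity test.
--     # Inner pass over a reversed row keeps (e, o) = '#'-counts at even/odd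
--     # columns of the suffix; prepending a char swaps the two roles.
--     # Outer pass over reversed rows likewise swaps (odd, even) when a row is
--     # prepended, since every later row's index parity flips.
--     odd_count = 0
--     even_count = 0
--     for row in reversed(text):
--         e = 0
--         o = 0
--         for c in reversed(row):
--             e, o = (1 if c == '#' else 0) + o, e
--         odd_count, even_count = even_count + e, odd_count + o
--     return odd_count, even_count
-- ===== Notes on version B (the rewrite author's own statement) =====
-- stated objective: alternative
-- what changed: Replaces enumerate-indexed iteration with per-cell (i+j)%2 tests by an index-free back-to-front fold over reversed rows/chars that maintains the even/odd counts and swaps them on each prepend.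
import Mathlib
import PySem

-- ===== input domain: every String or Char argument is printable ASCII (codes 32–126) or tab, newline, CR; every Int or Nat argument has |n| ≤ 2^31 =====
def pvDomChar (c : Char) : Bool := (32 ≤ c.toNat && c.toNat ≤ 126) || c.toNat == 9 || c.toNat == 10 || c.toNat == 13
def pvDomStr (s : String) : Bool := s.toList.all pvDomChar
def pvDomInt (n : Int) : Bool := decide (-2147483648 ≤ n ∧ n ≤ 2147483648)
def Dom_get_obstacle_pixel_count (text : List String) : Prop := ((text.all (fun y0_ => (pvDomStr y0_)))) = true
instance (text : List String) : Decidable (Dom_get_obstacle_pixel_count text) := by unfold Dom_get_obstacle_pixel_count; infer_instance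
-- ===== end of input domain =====

-- B replaces per-cell (i+j)%2 parity tests with an index-free back-to-front fold that swaps
-- the even/odd counters on each prepend; same cost, different decomposition.

-- ===== PORT A =====
def get_obstacle_pixel_count (text : List String) : Int × Int :=
  (PySem.List.enumerate text 0).foldl
    (fun (acc : Int × Int) (p : Int × String) =>
      (PySem.List.enumerate p.2.toList 0).foldl
        (fun (acc : Int × Int) (q : Int × Char) =>
          if q.2 = '#' then
            if PySem.Int.mod (p.1 + q.1) 2 = 0 then (acc.1 + 1, acc.2)
            else (acc.1, acc.2 + 1)
          else acc) acc)
    (0, 0)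

-- ===== PORT B =====
-- inner loop of Source B: over reversed(row), e,o = (1 if c=='#' else 0)+o, e
def pvPair (row : String) : Int × Int :=
  row.toList.reverse.foldl (fun (p : Int × Int) (c : Char) =>
    ((if c = '#' then 1 else 0) + p.2, p.1)) (0, 0)

def get_obstacle_pixel_count_alt (text : List String) : Int × Int :=
  text.reverse.foldl (fun (acc : Int × Int) (row : String) =>
    let e := (pvPair row).1
    let o := (pvPair row).2
    (acc.2 + e, acc.1 + o)) (0, 0)

-- ===== PRECONDITION & SPEC =====
def Spec_get_obstacle_pixel_count (text : List String) (out : Int × Int) : Prop := out = get_obstacle_pixel_count_alt text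
instance (text : List String) (out : Int × Int) : Decidable (Spec_get_obstacle_pixel_count text out) := by unfold Spec_get_obstacle_pixel_count; infer_instance

-- ===== CLAIM (what is proved, stated in full; the proofs are below) =====
def Claim_equal_get_obstacle_pixel_count : Prop := ∀ (text : List String), Dom_get_obstacle_pixel_count text → Spec_get_obstacle_pixel_count text (get_obstacle_pixel_count text)

-- ===== LEMMAS AND PROOFS =====

-- pvPair on the char list, as a pure function for induction
def pvPairL : List Char → Int × Int
  | [] => (0, 0)
  | c :: cs => ((if c = '#' then 1 else 0) + (pvPairL cs).2, (pvPairL cs).1)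

theorem pvPair_eq (cs : List Char) :
    cs.reverse.foldl (fun (p : Int × Int) (c : Char) =>
      ((if c = '#' then 1 else 0) + p.2, p.1)) (0, 0) = pvPairL cs := by
  induction cs with
  | nil => rfl
  | cons c cs ih => simp [List.foldl_append, pvPairL, ih]

def pvAltL : List String → Int × Int
  | [] => (0, 0)
  | r :: rs => ((pvAltL rs).2 + (pvPair r).1, (pvAltL rs).1 + (pvPair r).2)

theorem alt_eq (text : List String) : get_obstacle_pixel_count_alt text = pvAltL text := by
  unfold get_obstacle_pixel_count_alt
  induction text with
  | nil => rfl
  | cons r rs ih => simp [List.foldl_append, pvAltL, ih]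

-- A's inner loop over a row, starting at column index j, for row index i:
theorem inner_eq (i : Int) (cs : List Char) : ∀ (j : Int) (acc : Int × Int), 0 ≤ j → 0 ≤ i →
    (PySem.List.enumerate cs j).foldl
      (fun (acc : Int × Int) (q : Int × Char) =>
        if q.2 = '#' then
          if PySem.Int.mod (i + q.1) 2 = 0 then (acc.1 + 1, acc.2)
          else (acc.1, acc.2 + 1)
        else acc) acc
    = if (i + j) % 2 = 0 then (acc.1 + (pvPairL cs).1, acc.2 + (pvPairL cs).2)
      else (acc.1 + (pvPairL cs).2, acc.2 + (pvPairL cs).1) := by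
  induction cs with
  | nil => intro j acc hj hi; simp only [PySem.List.enumerate_nil, List.foldl_nil, pvPairL]
           split <;> simp
  | cons c cs ih =>
    intro j acc hj hi
    rw [PySem.List.enumerate_cons, List.foldl_cons, ih (j+1) _ (by omega) hi]
    have hm : PySem.Int.mod (i + j) 2 = (i + j) % 2 :=
      PySem.Int.mod_eq_emod_of_pos (by norm_num)
    simp only [hm]
    by_cases hc : c = '#' <;> by_cases h0 : (i + j) % 2 = 0
    · have h1 : ¬ ((i + (j+1)) % 2 = 0) := by omega
      rw [if_pos hc, if_pos h0, if_neg h1, if_pos h0]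
      simp only [pvPairL, if_pos hc, Prod.mk.injEq]
      constructor <;> first | ring | trivial
    · have h1 : (i + (j+1)) % 2 = 0 := by omega
      rw [if_pos hc, if_neg h0, if_pos h1, if_neg h0]
      simp only [pvPairL, if_pos hc, Prod.mk.injEq]
      constructor <;> first | ring | trivial
    · have h1 : ¬ ((i + (j+1)) % 2 = 0) := by omega
      rw [if_neg hc, if_neg h1, if_pos h0]
      simp only [pvPairL, if_neg hc, Prod.mk.injEq]
      constructor <;> first | ring | trivial
    · have h1 : (i + (j+1)) % 2 = 0 := by omega
      rw [if_neg hc, if_pos h1, if_neg h0]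
      simp only [pvPairL, if_neg hc, Prod.mk.injEq]
      constructor <;> first | ring | trivial

-- A's outer loop starting at row index i:
theorem outer_eq (text : List String) : ∀ (i : Int) (acc : Int × Int), 0 ≤ i →
    (PySem.List.enumerate text i).foldl
      (fun (acc : Int × Int) (p : Int × String) =>
        (PySem.List.enumerate p.2.toList 0).foldl
          (fun (acc : Int × Int) (q : Int × Char) =>
            if q.2 = '#' then
              if PySem.Int.mod (p.1 + q.1) 2 = 0 then (acc.1 + 1, acc.2)
              else (acc.1, acc.2 + 1)
            else acc) acc) acc
    = if i % 2 = 0 then (acc.1 + (pvAltL text).1, acc.2 + (pvAltL text).2)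
      else (acc.1 + (pvAltL text).2, acc.2 + (pvAltL text).1) := by
  induction text with
  | nil => intro i acc hi; simp only [PySem.List.enumerate_nil, List.foldl_nil, pvAltL]
           split <;> simp
  | cons r rs ih =>
    intro i acc hi
    rw [PySem.List.enumerate_cons, List.foldl_cons,
        inner_eq i r.toList 0 acc (le_refl 0) hi, ih (i+1) _ (by omega)]
    have hz : i + 0 = i := by ring
    have hpv : pvPair r = pvPairL r.toList := pvPair_eq r.toList
    rw [hz]
    by_cases h0 : i % 2 = 0
    · have h1 : ¬ ((i + 1) % 2 = 0) := by omega
      rw [if_pos h0, if_neg h1, if_pos h0]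
      simp only [pvAltL, hpv, Prod.mk.injEq]
      constructor <;> ring
    · have h1 : (i + 1) % 2 = 0 := by omega
      rw [if_neg h0, if_pos h1, if_neg h0]
      simp only [pvAltL, hpv, Prod.mk.injEq]
      constructor <;> ring

-- ===== VERDICT (by name: the statement is the Claim_ definition above) =====
theorem get_obstacle_pixel_count_spec : Claim_equal_get_obstacle_pixel_count := by
  intro text _
  unfold Spec_get_obstacle_pixel_count get_obstacle_pixel_count
  rw [outer_eq text 0 (0, 0) (le_refl 0), alt_eq]
  norm_num
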